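-- pv_equiv track=rewrite | github.com/asver12/contour-maps-visualization | src/picture_cross.py | filter_order_color
-- ===== SOURCE A (Python) =====
-- def filter_order_color(list_1):
--     new_list = []
--     idx = []
--     for i, lst in enumerate(list_1):
--         for j in new_list:
--             if all(k in j for k in lst):
--                 break
--         else:
--             new_list.append(lst)
--             idx.append(i)
--     return idx, new_list
-- ===== SOURCE B (Python) =====
-- def filter_order_color(list_1):
--     # Decide each index independently: keep list_1[i] iff it is not contained
--     # (all elements present) in any earlier list_1[j], j < i.  By transitivity of
--     # element-containment this matches the greedy kept-accumulator version.
--     keep = [i for i, lst in enumerate(list_1)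
--             if not any(all(k in p for k in lst) for p in list_1[:i])]
--     return keep, [list_1[i] for i in keep]
-- ===== Notes on version B (the rewrite author's own statement) =====
-- stated objective: simpler
-- what changed: Replaces the greedy accumulator (scan the growing kept list to decide, append idx and new_list separately) with an order-independent per-index rule: keep i iff list_1[i] is contained in no earlier list_1[j], computed as one comprehension over all predecessors; correctness rests on transitivity of element-containment.
import Mathlib
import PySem

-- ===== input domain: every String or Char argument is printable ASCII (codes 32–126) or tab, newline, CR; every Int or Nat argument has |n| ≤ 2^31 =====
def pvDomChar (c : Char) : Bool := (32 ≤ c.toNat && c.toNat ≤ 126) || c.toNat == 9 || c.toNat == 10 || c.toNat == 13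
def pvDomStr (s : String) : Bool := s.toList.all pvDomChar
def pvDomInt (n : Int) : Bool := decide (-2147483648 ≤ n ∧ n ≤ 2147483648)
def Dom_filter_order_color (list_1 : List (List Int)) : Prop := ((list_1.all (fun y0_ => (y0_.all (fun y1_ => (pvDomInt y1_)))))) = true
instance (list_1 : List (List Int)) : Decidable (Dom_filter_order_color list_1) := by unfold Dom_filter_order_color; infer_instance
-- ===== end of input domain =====

-- ===== PORT A =====
-- B differs from A by deciding keep/drop against all predecessors instead of the
-- greedy kept accumulator; return values agree on all inputs (proved total equivalence).

-- enumerate(list_1) starting at index i (helper, used by both ports)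
def enumFrom (i : Nat) : List (List Int) → List (Nat × List Int)
  | [] => []
  | l :: ls => (i, l) :: enumFrom (i + 1) ls

-- literal port of A: fold over enumerate, scanning the accumulated new_list
def filter_order_color (list_1 : List (List Int)) : List Int × List (List Int) :=
  (enumFrom 0 list_1).foldl
    (fun (st : List Int × List (List Int)) p =>
      if st.2.any (fun j => p.2.all (fun k => j.contains k)) then st
      else (st.1 ++ [(p.1 : Int)], st.2 ++ [p.2]))
    (([] : List Int), ([] : List (List Int)))

-- ===== PORT B =====
-- literal port of B: keep index i iff list_1[i] is contained in no list_1[j], j < i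
def filter_order_color_alt (list_1 : List (List Int)) : List Int × List (List Int) :=
  let keep := (enumFrom 0 list_1).filter
    (fun p => !((list_1.take p.1).any (fun q => p.2.all (fun k => q.contains k))))
  (keep.map (fun p => (p.1 : Int)), keep.map (fun p => p.2))

-- ===== PRECONDITION & SPEC =====
def Spec_filter_order_color (list_1 : List (List Int)) (out : List Int × List (List Int)) : Prop := out = filter_order_color_alt list_1
instance (list_1 : List (List Int)) (out : List Int × List (List Int)) : Decidable (Spec_filter_order_color list_1 out) := by unfold Spec_filter_order_color; infer_instance

-- ===== CLAIM (what is proved, stated in full; the proofs are below) =====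
def Claim_equal_filter_order_color : Prop := ∀ (list_1 : List (List Int)), Dom_filter_order_color list_1 → Spec_filter_order_color list_1 (filter_order_color list_1)

-- ===== LEMMAS AND PROOFS =====

-- containment test shared by both ports
def SubB (l j : List Int) : Bool := l.all (fun k => j.contains k)

-- reference computation: kept (index, list) pairs, given the kept lists so far
def G : List (List Int) → Nat → List (List Int) → List (Nat × List Int)
  | [], _, _ => []
  | lst :: rest, i, kept =>
    if kept.any (SubB lst) then G rest (i + 1) kept
    else (i, lst) :: G rest (i + 1) (kept ++ [lst])

theorem subB_trans {a b c : List Int} (h₁ : SubB a b = true) (h₂ : SubB b c = true) :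
    SubB a c = true := by
  simp only [SubB, List.all_eq_true, List.contains_iff_mem] at *
  exact fun x hx => h₂ _ (h₁ _ hx)

theorem foldA_eq (rest : List (List Int)) :
    ∀ (i : Nat) (st : List Int × List (List Int)),
      (enumFrom i rest).foldl
        (fun (st : List Int × List (List Int)) p =>
          if st.2.any (fun j => p.2.all (fun k => j.contains k)) then st
          else (st.1 ++ [(p.1 : Int)], st.2 ++ [p.2])) st
      = (st.1 ++ (G rest i st.2).map (fun p => (p.1 : Int)),
         st.2 ++ (G rest i st.2).map Prod.snd) := by
  induction rest with
  | nil => intro i st; simp [enumFrom, G]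
  | cons lst rest ih =>
    intro i st
    simp only [enumFrom, List.foldl_cons, G]
    by_cases h : st.2.any (SubB lst) = true
    · have h2 : (st.2.any fun j => lst.all fun k => j.contains k) = true := h
      rw [if_pos h, if_pos h2, ih]
    · have h2 : ¬(st.2.any fun j => lst.all fun k => j.contains k) = true := h
      rw [if_neg h, if_neg h2, ih]
      simp

theorem filterB_eq (rest : List (List Int)) :
    ∀ (pre kept full : List (List Int)),
      full = pre ++ rest →
      (∀ l, kept.any (SubB l) = pre.any (SubB l)) →
      (enumFrom pre.length rest).filter
          (fun p => !((full.take p.1).any (fun q => p.2.all (fun k => q.contains k))))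
        = G rest pre.length kept := by
  induction rest with
  | nil => intro pre kept full _ _; simp [enumFrom, G]
  | cons lst rest ih =>
    intro pre kept full hfull hinv
    have htake : full.take pre.length = pre := by
      subst hfull; simpa using List.take_left pre (lst :: rest)
    have hcond : (full.take pre.length).any (fun q => lst.all (fun k => q.contains k))
        = kept.any (SubB lst) := by
      rw [htake, hinv lst]; rfl
    have hlen : pre.length + 1 = (pre ++ [lst]).length := by simp
    have hfull' : full = (pre ++ [lst]) ++ rest := by simp [hfull]
    simp only [enumFrom, List.filter_cons, G]
    by_cases h : kept.any (SubB lst) = true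
    · rw [if_pos h]
      have : (!((full.take pre.length).any (fun q => lst.all (fun k => q.contains k)))) = false := by
        rw [hcond, h]; rfl
      rw [this]
      rw [hlen, ih (pre ++ [lst]) kept full hfull']
      · simp
      · intro l
        rw [hinv l, List.any_append]
        by_cases hl : SubB l lst = true
        · obtain ⟨j, hj, hsub⟩ := List.any_eq_true.mp h
          have : pre.any (SubB l) = true := by
            rw [← hinv l]
            exact List.any_eq_true.mpr ⟨j, hj, subB_trans hl hsub⟩
          simp [this]
        · simp [Bool.eq_false_iff.mpr hl]
    · rw [if_neg h]
      have hb : kept.any (SubB lst) = false := Bool.eq_false_iff.mpr h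
      have : (!((full.take pre.length).any (fun q => lst.all (fun k => q.contains k)))) = true := by
        rw [hcond, hb]; rfl
      rw [this]
      simp only [if_pos rfl]
      rw [hlen, ih (pre ++ [lst]) (kept ++ [lst]) full hfull']
      · simp
      · intro l
        simp only [List.any_append, List.any_cons, List.any_nil]
        rw [hinv l]

-- ===== VERDICT (by name: the statement is the Claim_ definition above) =====
theorem filter_order_color_spec : Claim_equal_filter_order_color := by
  intro list_1 _
  unfold Spec_filter_order_color filter_order_color filter_order_color_alt
  rw [foldA_eq list_1 0 ([], [])]
  have h := filterB_eq list_1 [] [] list_1 (by simp) (fun l => rfl)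
  simp only [List.length_nil] at h
  rw [h]
  simp
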